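-- pv_equiv track=rewrite | github.com/qinetique/HackerRank-Interview-Preparation-Kit | InterviewPreparation/Graphs /Roads and Libraries.py | building
-- ===== SOURCE A (Python) =====
-- def building(nd, g, vst, c_road):
--     c = 0
--     for another_nd in g[nd]:
--         if not vst[another_nd]:
--             vst[another_nd] = True
--             c += c_road
--             c += building(another_nd, g, vst, c_road)
--     return c
-- ===== SOURCE B (Python) =====
-- def building(nd, g, vst, c_road):
--     # Iterative DFS: the implicit call stack of the recursive version is replaced
--     # by an explicit stack of adjacency iterators; nodes are marked and paid for
--     # at discovery (push) time, exactly once each.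
--     c = 0
--     stack = [iter(g[nd])]
--     while stack:
--         a = next(stack[-1], None)
--         if a is None:
--             stack.pop()
--         elif not vst[a]:
--             vst[a] = True
--             c += c_road
--             stack.append(iter(g[a]))
--     return c
-- ===== Notes on version B (the rewrite author's own statement) =====
-- stated objective: idiomatic
-- what changed: The recursive DFS is replaced by an iterative DFS with an explicit stack of adjacency iterators (a while-loop, marking and adding c_road at discovery time), removing recursion and its depth limit.
-- outside the precondition, e.g. on building(0, {0: [], 5: [7]}, {5: False}, 1): A returns 0, B returns 0
import Mathlib
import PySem

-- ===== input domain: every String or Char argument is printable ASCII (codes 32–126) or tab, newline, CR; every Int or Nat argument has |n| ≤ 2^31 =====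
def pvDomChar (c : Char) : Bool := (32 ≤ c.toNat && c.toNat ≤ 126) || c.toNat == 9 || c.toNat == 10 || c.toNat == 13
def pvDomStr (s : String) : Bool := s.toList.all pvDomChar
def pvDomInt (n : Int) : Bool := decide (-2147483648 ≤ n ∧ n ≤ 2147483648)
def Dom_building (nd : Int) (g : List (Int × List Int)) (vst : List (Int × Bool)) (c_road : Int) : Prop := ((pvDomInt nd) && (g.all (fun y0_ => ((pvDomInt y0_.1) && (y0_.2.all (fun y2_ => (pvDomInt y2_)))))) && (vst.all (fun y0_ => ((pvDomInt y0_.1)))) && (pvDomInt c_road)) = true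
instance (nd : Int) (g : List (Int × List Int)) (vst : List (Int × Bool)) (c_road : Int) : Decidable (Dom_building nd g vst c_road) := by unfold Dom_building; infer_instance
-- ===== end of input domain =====

-- B replaces A's recursive DFS by an iterative DFS over an explicit stack of adjacency
-- iterators (same discovery-time marking); return values agree, and both mutate the vst
-- dict identically (the equivalence proved here is about the return value).

-- Association-list model of the Python dicts (first-match lookup; assignment overwrites
-- the first matching entry in place, appends a fresh key): exact for Python dicts with
-- unique keys (Pre_ requires key uniqueness).
def aget? {β : Type} (d : List (Int × β)) (k : Int) : Option β :=
  match d with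
  | [] => none
  | (k', v) :: t => if k' = k then some v else aget? t k

def agetD {β : Type} (d : List (Int × β)) (k : Int) (dflt : β) : β :=
  (aget? d k).getD dflt

def aset {β : Type} (d : List (Int × β)) (k : Int) (v : β) : List (Int × β) :=
  match d with
  | [] => [(k, v)]
  | (k', v') :: t => if k' = k then (k', v) :: t else (k', v') :: aset t k v

-- number of still-unvisited entries: the termination measure of both traversals
def cntF (d : List (Int × Bool)) : Nat := (d.filter (fun p => !p.2)).length

theorem cntF_cons (k : Int) (v : Bool) (t : List (Int × Bool)) :
    cntF ((k, v) :: t) = (if v then 0 else 1) + cntF t := by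
  cases v
  · simp [cntF]
    omega
  · simp [cntF]

theorem cntF_aset_true_lt (d : List (Int × Bool)) (a : Int)
    (h : aget? d a = some false) : cntF (aset d a true) < cntF d := by
  induction d with
  | nil => simp [aget?] at h
  | cons p t ih =>
    obtain ⟨k', v'⟩ := p
    by_cases hk : k' = a
    · simp only [aget?, if_pos hk] at h
      have hv : v' = false := by simpa using h
      subst hv
      have ha : aset ((k', false) :: t) a true = (k', true) :: t := by simp [aset, hk]
      rw [ha, cntF_cons, cntF_cons]
      simp
    · simp only [aget?, if_neg hk] at h
      have := ih h
      have ha : aset ((k', v') :: t) a true = (k', v') :: aset t a true := by simp [aset, hk]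
      rw [ha, cntF_cons, cntF_cons]
      omega

-- ===== PORT A =====
-- A's recursion 'building(another_nd, …)' is made total with a fuel argument; each
-- recursive call happens right after one entry of vst flips False→True, so fuel
-- vst.length suffices on Pre_ inputs (proved in loopA_fuel/sim below).
-- loopA g cr f ns vst runs A's for-loop over the remaining neighbour list ns,
-- returning (c, updated vst); the inner 'building a' call is loopA over g[a].
def loopA (g : List (Int × List Int)) (cr : Int) :
    Nat → List Int → List (Int × Bool) → Int × List (Int × Bool)
  | _, [], vst => (0, vst)
  | f, a :: as, vst =>
    if agetD vst a false then loopA g cr f as vst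
    else
      let vst1 := aset vst a true
      let r1 : Int × List (Int × Bool) :=
        match f with
        | 0 => (0, vst1)          -- fuel exhausted (unreachable under Pre_)
        | f' + 1 => loopA g cr f' (agetD g a []) vst1
      let r2 := loopA g cr f as r1.2
      (cr + r1.1 + r2.1, r2.2)
  termination_by f ns _ => (f, ns.length)

def building (nd : Int) (g : List (Int × List Int)) (vst : List (Int × Bool)) (c_road : Int) : Int :=
  (loopA g c_road vst.length (agetD g nd []) vst).1

-- ===== PORT B =====
-- the stack of iterators: Lean list with the stack top (Python stack[-1]) at the head;
-- an iterator is the list of its not-yet-yielded elements.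
def goB (g : List (Int × List Int)) (cr : Int) :
    List (List Int) → Int → List (Int × Bool) → Int
  | [], c, _ => c                                   -- while stack: loop ends
  | [] :: rest, c, vst => goB g cr rest c vst       -- next(...) is None: stack.pop()
  | (a :: as) :: rest, c, vst =>
    if agetD vst a false then goB g cr (as :: rest) c vst
    else
      match h : aget? vst a with
      | some _ => goB g cr (agetD g a [] :: as :: rest) (c + cr) (aset vst a true)
      | none => goB g cr (as :: rest) c vst         -- KeyError in Python (outside Pre_); skip to stay total
  termination_by stack _ vst => (cntF vst, (stack.map List.length).sum + stack.length)
  decreasing_by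
  · exact Prod.Lex.right _ (by simp)
  · exact Prod.Lex.right _ (by simp)
  · apply Prod.Lex.left
    rename_i hv val
    rw [agetD, h] at hv
    simp at hv
    exact cntF_aset_true_lt vst a (hv ▸ h)
  · exact Prod.Lex.right _ (by simp)

def building_alt (nd : Int) (g : List (Int × List Int)) (vst : List (Int × Bool)) (c_road : Int) : Int :=
  goB g c_road [agetD g nd []] 0 vst

-- ===== PRECONDITION & SPEC =====
-- Pre_ excludes the inputs on which Python raises KeyError (nd not a key of g; a
-- neighbour that is not a key of vst, or unvisited and not a key of g). Only entries
-- of g that can ever be expanded (key = nd, or key still unvisited) are constrained;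
-- exact reachability is not closed-form, so this still excludes some inputs whose bad
-- entries are never reached and on which A returns (see cites); duplicate keys are
-- excluded because a Python dict cannot carry them.
def Pre_building (nd : Int) (g : List (Int × List Int)) (vst : List (Int × Bool)) (c_road : Int) : Prop :=
  (g.map Prod.fst).Nodup ∧ (vst.map Prod.fst).Nodup ∧ nd ∈ g.map Prod.fst ∧
  ∀ p ∈ g, (p.1 = nd ∨ (p.1, false) ∈ vst) → ∀ a ∈ p.2,
    a ∈ vst.map Prod.fst ∧ ((a, false) ∈ vst → a ∈ g.map Prod.fst)
instance (nd : Int) (g : List (Int × List Int)) (vst : List (Int × Bool)) (c_road : Int) : Decidable (Pre_building nd g vst c_road) := by unfold Pre_building; infer_instance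

def pvWitness_building : Int × (List (Int × List Int)) × (List (Int × Bool)) × Int :=
  (1, [(1, [2]), (2, [1])], [(1, true), (2, false)], 5)

def Spec_building (nd : Int) (g : List (Int × List Int)) (vst : List (Int × Bool)) (c_road : Int) (out : Int) : Prop := out = building_alt nd g vst c_road
instance (nd : Int) (g : List (Int × List Int)) (vst : List (Int × Bool)) (c_road : Int) (out : Int) : Decidable (Spec_building nd g vst c_road out) := by unfold Spec_building; infer_instance

-- ===== CLAIM (what is proved, stated in full; the proofs are below) =====
def Claim_equal_building : Prop := ∀ (nd : Int) (g : List (Int × List Int)) (vst : List (Int × Bool)) (c_road : Int), Dom_building nd g vst c_road → Pre_building nd g vst c_road → Spec_building nd g vst c_road (building nd g vst c_road)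

-- ===== LEMMAS AND PROOFS =====

-- every adjacency target of g is a key of vst
def GOODv (g : List (Int × List Int)) (vst : List (Int × Bool)) : Prop :=
  ∀ p ∈ g, (p.1, false) ∈ vst → ∀ a ∈ p.2, (aget? vst a).isSome = true

theorem aget?_mem {β : Type} (d : List (Int × β)) (k : Int) (v : β)
    (h : aget? d k = some v) : (k, v) ∈ d := by
  induction d with
  | nil => simp [aget?] at h
  | cons p t ih =>
    obtain ⟨k', v'⟩ := p
    by_cases hk : k' = k
    · simp only [aget?, if_pos hk] at h
      have hv : v' = v := by simpa using h
      rw [← hk, ← hv]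
      exact List.mem_cons_self
    · simp only [aget?, if_neg hk] at h
      exact List.mem_cons_of_mem _ (ih h)

-- simpler characterizations we actually use
theorem aget?_aset_self {β : Type} (d : List (Int × β)) (k : Int) (v : β) :
    aget? (aset d k v) k = some v := by
  induction d with
  | nil => simp [aset, aget?]
  | cons p t ih =>
    obtain ⟨k', v'⟩ := p
    by_cases hk : k' = k <;> simp [aset, hk, aget?, ih]

theorem aget?_aset_ne {β : Type} (d : List (Int × β)) (k : Int) (v : β) (b : Int)
    (hne : k ≠ b) : aget? (aset d k v) b = aget? d b := by
  induction d with
  | nil => simp [aset, aget?, fun h => hne h]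
  | cons p t ih =>
    obtain ⟨k', v'⟩ := p
    by_cases hk : k' = k
    · subst hk; simp [aset, aget?, hne]
    · simp [aset, hk, aget?, ih]

theorem isSome_aset {β : Type} (d : List (Int × β)) (k : Int) (v : β)
    (hk : (aget? d k).isSome = true) (b : Int) :
    (aget? (aset d k v) b).isSome = (aget? d b).isSome := by
  by_cases h : k = b
  · subst h; simp [aget?_aset_self, hk]
  · simp [aget?_aset_ne d k v b h]

theorem mem_false_aset_true (d : List (Int × Bool)) (k x : Int)
    (h : (x, false) ∈ aset d k true) : (x, false) ∈ d := by
  induction d with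
  | nil => simp [aset] at h
  | cons p t ih =>
    obtain ⟨k', v'⟩ := p
    by_cases hk : k' = k
    · rw [show aset ((k', v') :: t) k true = (k', true) :: t by simp [aset, hk]] at h
      rcases List.mem_cons.mp h with h | h
      · cases h
      · exact List.mem_cons_of_mem _ h
    · rw [show aset ((k', v') :: t) k true = (k', v') :: aset t k true by simp [aset, hk]] at h
      rcases List.mem_cons.mp h with h | h
      · exact h ▸ List.mem_cons_self
      · exact List.mem_cons_of_mem _ (ih h)

theorem goodv_aset (g : List (Int × List Int)) (vst : List (Int × Bool)) (k : Int)
    (hk : (aget? vst k).isSome = true) (hg : GOODv g vst) : GOODv g (aset vst k true) := by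
  intro p hp hm a ha
  rw [isSome_aset vst k true hk a]
  exact hg p hp (mem_false_aset_true vst k p.1 hm) a ha

theorem goodv_adj (g : List (Int × List Int)) (vst : List (Int × Bool))
    (hg : GOODv g vst) (a b : Int) (hfa : aget? vst a = some false)
    (hb : b ∈ agetD g a []) : (aget? vst b).isSome = true := by
  unfold agetD at hb
  cases h : aget? g a with
  | none => rw [h] at hb; simp at hb
  | some ns =>
    rw [h] at hb; simp at hb
    exact hg (a, ns) (aget?_mem g a ns h) (aget?_mem vst a false hfa) b hb

theorem cntF_pos (d : List (Int × Bool)) (a : Int) (h : aget? d a = some false) :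
    1 ≤ cntF d := by
  have := aget?_mem d a false h
  unfold cntF
  have : (a, false) ∈ d.filter (fun p => !p.2) := by
    simp [List.mem_filter, this]
  exact List.length_pos_of_mem this

-- unfold equations for loopA and goB
theorem loopA_nil (g : List (Int × List Int)) (cr : Int) (f : Nat) (vst : List (Int × Bool)) :
    loopA g cr f [] vst = (0, vst) := by simp [loopA]

theorem loopA_cons_visited (g : List (Int × List Int)) (cr : Int) (f : Nat) (a : Int)
    (as : List Int) (vst : List (Int × Bool)) (hv : agetD vst a false = true) :
    loopA g cr f (a :: as) vst = loopA g cr f as vst := by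
  rw [loopA]; simp [hv]

theorem loopA_cons_new_zero (g : List (Int × List Int)) (cr : Int) (a : Int)
    (as : List Int) (vst : List (Int × Bool)) (hv : agetD vst a false = false) :
    loopA g cr 0 (a :: as) vst =
      (cr + 0 + (loopA g cr 0 as (aset vst a true)).1,
        (loopA g cr 0 as (aset vst a true)).2) := by
  rw [loopA]; simp [hv]

theorem loopA_cons_new_succ (g : List (Int × List Int)) (cr : Int) (f' : Nat) (a : Int)
    (as : List Int) (vst : List (Int × Bool)) (hv : agetD vst a false = false) :
    loopA g cr (f' + 1) (a :: as) vst =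
      (cr + (loopA g cr f' (agetD g a []) (aset vst a true)).1 +
          (loopA g cr (f' + 1) as (loopA g cr f' (agetD g a []) (aset vst a true)).2).1,
        (loopA g cr (f' + 1) as (loopA g cr f' (agetD g a []) (aset vst a true)).2).2) := by
  rw [loopA]; simp [hv]

theorem goB_nil (g : List (Int × List Int)) (cr c : Int) (vst : List (Int × Bool)) :
    goB g cr [] c vst = c := by simp [goB]

theorem goB_pop (g : List (Int × List Int)) (cr : Int) (rest : List (List Int)) (c : Int)
    (vst : List (Int × Bool)) : goB g cr ([] :: rest) c vst = goB g cr rest c vst := by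
  rw [goB]

theorem goB_skip (g : List (Int × List Int)) (cr a : Int) (as : List Int)
    (rest : List (List Int)) (c : Int) (vst : List (Int × Bool))
    (hv : agetD vst a false = true) :
    goB g cr ((a :: as) :: rest) c vst = goB g cr (as :: rest) c vst := by
  rw [goB]; simp [hv]

theorem goB_push (g : List (Int × List Int)) (cr a : Int) (as : List Int)
    (rest : List (List Int)) (c : Int) (vst : List (Int × Bool)) (b : Bool)
    (hv : agetD vst a false = false) (hb : aget? vst a = some b) :
    goB g cr ((a :: as) :: rest) c vst =
      goB g cr (agetD g a [] :: as :: rest) (c + cr) (aset vst a true) := by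
  rw [goB]
  simp only [hv, Bool.false_eq_true, if_false]
  split
  · rfl
  · rename_i h; rw [hb] at h; cases h

theorem goodv_of_inv (g : List (Int × List Int)) (vst vst' : List (Int × Bool))
    (h : ∀ b, (aget? vst' b).isSome = (aget? vst b).isSome)
    (hm : ∀ x, (x, false) ∈ vst' → (x, false) ∈ vst) (hg : GOODv g vst) :
    GOODv g vst' := fun p hp hpm a ha => (h a).trans (hg p hp (hm p.1 hpm) a ha)

-- the result of loopA keeps the same key set and does not increase cntF
theorem isSome_aget?_of_mem_keys {β : Type} (d : List (Int × β)) (k : Int)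
    (h : k ∈ d.map Prod.fst) : (aget? d k).isSome = true := by
  induction d with
  | nil => simp at h
  | cons p t ih =>
    obtain ⟨k', v'⟩ := p
    by_cases hk : k' = k
    · simp [aget?, hk]
    · simp only [List.map_cons, List.mem_cons] at h
      rcases h with h | h
      · exact absurd h.symm hk
      · exact (by simp [aget?, hk, ih h])

theorem loopA_inv (g : List (Int × List Int)) (cr : Int) :
    ∀ N f ns vst, cntF vst ≤ N → GOODv g vst →
      (∀ a ∈ ns, (aget? vst a).isSome = true) →
      (∀ b, (aget? (loopA g cr f ns vst).2 b).isSome = (aget? vst b).isSome) ∧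
        cntF (loopA g cr f ns vst).2 ≤ cntF vst ∧
        (∀ x, (x, false) ∈ (loopA g cr f ns vst).2 → (x, false) ∈ vst) := by
  intro N
  induction N with
  | zero =>
    intro f ns
    induction ns with
    | nil => intro vst h0 hg hns; simp [loopA_nil]
    | cons a as ih =>
      intro vst h0 hg hns
      have hsome := hns a (by simp)
      cases hb : aget? vst a with
      | none => rw [hb] at hsome; simp at hsome
      | some b =>
        cases b with
        | false => exact absurd h0 (by have := cntF_pos vst a hb; omega)
        | true =>
          have hv : agetD vst a false = true := by simp [agetD, hb]
          rw [loopA_cons_visited g cr f a as vst hv]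
          exact ih vst h0 hg (fun x hx => hns x (by simp [hx]))
  | succ N ihN =>
    intro f ns
    induction ns with
    | nil => intro vst hc hg hns; simp [loopA_nil]
    | cons a as ih =>
      intro vst hc hg hns
      have hsome := hns a (by simp)
      cases hb : aget? vst a with
      | none => rw [hb] at hsome; simp at hsome
      | some b =>
      cases b with
      | true =>
        have hv : agetD vst a false = true := by simp [agetD, hb]
        rw [loopA_cons_visited g cr f a as vst hv]
        exact ih vst hc hg (fun x hx => hns x (by simp [hx]))
      | false =>
        have hv : agetD vst a false = false := by simp [agetD, hb]
        have hlt := cntF_aset_true_lt vst a hb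
        have hkey : (aget? vst a).isSome = true := by simp [hb]
        have hps : ∀ x, (aget? (aset vst a true) x).isSome = (aget? vst x).isSome :=
          isSome_aset vst a true hkey
        have hg1 : GOODv g (aset vst a true) := goodv_aset g vst a hkey hg
        have hc1 : cntF (aset vst a true) ≤ N := by omega
        cases f with
        | zero =>
          rw [loopA_cons_new_zero g cr a as vst hv]
          have h2 := ihN 0 as (aset vst a true) hc1 hg1
            (fun x hx => by rw [hps x]; exact hns x (by simp [hx]))
          refine ⟨fun x => ?_, ?_, fun x hx => ?_⟩
          · dsimp only
            rw [h2.1 x, hps x]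
          · dsimp only
            have := h2.2.1
            omega
          · dsimp only at hx
            exact mem_false_aset_true vst a x (h2.2.2 x hx)
        | succ f' =>
          rw [loopA_cons_new_succ g cr f' a as vst hv]
          have hadj : ∀ x ∈ agetD g a [], (aget? (aset vst a true) x).isSome = true :=
            fun x hx => by rw [hps x]; exact goodv_adj g vst hg a x hb hx
          have h1 := ihN f' (agetD g a []) (aset vst a true) hc1 hg1 hadj
          have hg2 : GOODv g (loopA g cr f' (agetD g a []) (aset vst a true)).2 :=
            goodv_of_inv g (aset vst a true) _ h1.1 h1.2.2 hg1
          have hc2 : cntF (loopA g cr f' (agetD g a []) (aset vst a true)).2 ≤ N :=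
            le_trans h1.2.1 hc1
          have h2 := ihN (f' + 1) as (loopA g cr f' (agetD g a []) (aset vst a true)).2 hc2 hg2
            (fun x hx => by rw [h1.1 x, hps x]; exact hns x (by simp [hx]))
          refine ⟨fun x => ?_, ?_, fun x hx => ?_⟩
          · dsimp only
            rw [h2.1 x, h1.1 x, hps x]
          · dsimp only
            have := h1.2.1
            have := h2.2.1
            omega
          · dsimp only at hx
            exact mem_false_aset_true vst a x (h1.2.2 x (h2.2.2 x hx))

-- loopA's value does not depend on the fuel once it is at least cntF vst
theorem loopA_fuel (g : List (Int × List Int)) (cr : Int) :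
    ∀ N f f' ns vst, cntF vst ≤ N → cntF vst ≤ f → cntF vst ≤ f' → GOODv g vst →
      (∀ a ∈ ns, (aget? vst a).isSome = true) →
      loopA g cr f ns vst = loopA g cr f' ns vst := by
  intro N
  induction N with
  | zero =>
    intro f f' ns
    induction ns with
    | nil => intro vst _ _ _ _ _; rw [loopA_nil, loopA_nil]
    | cons a as ih =>
      intro vst h0 hf hf' hg hns
      have hsome := hns a (by simp)
      cases hb : aget? vst a with
      | none => rw [hb] at hsome; simp at hsome
      | some b =>
        cases b with
        | false => exact absurd h0 (by have := cntF_pos vst a hb; omega)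
        | true =>
          have hv : agetD vst a false = true := by simp [agetD, hb]
          rw [loopA_cons_visited g cr f a as vst hv, loopA_cons_visited g cr f' a as vst hv]
          exact ih vst h0 hf hf' hg (fun x hx => hns x (by simp [hx]))
  | succ N ihN =>
    intro f f' ns
    induction ns with
    | nil => intro vst _ _ _ _ _; rw [loopA_nil, loopA_nil]
    | cons a as ih =>
      intro vst hc hf hf' hg hns
      have hsome := hns a (by simp)
      cases hb : aget? vst a with
      | none => rw [hb] at hsome; simp at hsome
      | some b =>
      cases b with
      | true =>
        have hv : agetD vst a false = true := by simp [agetD, hb]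
        rw [loopA_cons_visited g cr f a as vst hv, loopA_cons_visited g cr f' a as vst hv]
        exact ih vst hc hf hf' hg (fun x hx => hns x (by simp [hx]))
      | false =>
        have hv : agetD vst a false = false := by simp [agetD, hb]
        have hpos := cntF_pos vst a hb
        have hlt := cntF_aset_true_lt vst a hb
        have hkey : (aget? vst a).isSome = true := by simp [hb]
        have hps : ∀ x, (aget? (aset vst a true) x).isSome = (aget? vst x).isSome :=
          isSome_aset vst a true hkey
        have hg1 : GOODv g (aset vst a true) := goodv_aset g vst a hkey hg
        have hc1 : cntF (aset vst a true) ≤ N := by omega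
        obtain ⟨fa, rfl⟩ : ∃ fa, f = fa + 1 := ⟨f - 1, by omega⟩
        obtain ⟨fb, rfl⟩ : ∃ fb, f' = fb + 1 := ⟨f' - 1, by omega⟩
        rw [loopA_cons_new_succ g cr fa a as vst hv, loopA_cons_new_succ g cr fb a as vst hv]
        have hadj : ∀ x ∈ agetD g a [], (aget? (aset vst a true) x).isSome = true :=
          fun x hx => by rw [hps x]; exact goodv_adj g vst hg a x hb hx
        have hr1 : loopA g cr fb (agetD g a []) (aset vst a true) =
            loopA g cr fa (agetD g a []) (aset vst a true) :=
          ihN fb fa (agetD g a []) (aset vst a true) hc1 (by omega) (by omega) hg1 hadj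
        rw [hr1]
        have h1 := loopA_inv g cr N fa (agetD g a []) (aset vst a true) hc1 hg1 hadj
        have hg2 : GOODv g (loopA g cr fa (agetD g a []) (aset vst a true)).2 :=
          goodv_of_inv g (aset vst a true) _ h1.1 h1.2.2 hg1
        have hr2 : loopA g cr (fa + 1) as (loopA g cr fa (agetD g a []) (aset vst a true)).2 =
            loopA g cr (fb + 1) as (loopA g cr fa (agetD g a []) (aset vst a true)).2 :=
          ihN (fa + 1) (fb + 1) as _ (le_trans h1.2.1 hc1) (by omega) (by omega) hg2
            (fun x hx => by rw [h1.1 x, hps x]; exact hns x (by simp [hx]))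
        rw [hr2]

-- the folded form of A that goB computes frame by frame
def runA (g : List (Int × List Int)) (cr : Int) (f : Nat) :
    List (List Int) → Int → List (Int × Bool) → Int
  | [], c, _ => c
  | fr :: rest, c, vst =>
    runA g cr f rest (c + (loopA g cr f fr vst).1) (loopA g cr f fr vst).2

-- simulation: the explicit stack machine computes the folded recursive traversal
theorem runA_cons (g : List (Int × List Int)) (cr : Int) (f : Nat) (fr : List Int)
    (rest : List (List Int)) (c : Int) (vst : List (Int × Bool)) :
    runA g cr f (fr :: rest) c vst =
      runA g cr f rest (c + (loopA g cr f fr vst).1) (loopA g cr f fr vst).2 := rfl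

theorem sim (g : List (Int × List Int)) (cr : Int) (f : Nat) :
    ∀ N stack vst c, cntF vst ≤ N → cntF vst ≤ f → GOODv g vst →
      (∀ fr ∈ stack, ∀ a ∈ fr, (aget? vst a).isSome = true) →
      goB g cr stack c vst = runA g cr f stack c vst := by
  intro N
  induction N using Nat.strong_induction_on with
  | _ N ihN =>
    intro stack
    induction stack with
    | nil => intro vst c _ _ _ _; rw [goB_nil]; rfl
    | cons fr rest ihS =>
      induction fr with
      | nil =>
        intro vst c hc hf hg hst
        rw [goB_pop, ihS vst c hc hf hg (fun x hx => hst x (by simp [hx]))]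
        rw [runA_cons, loopA_nil]
        norm_num
      | cons a as ihF =>
        intro vst c hc hf hg hst
        have hsome := hst (a :: as) (by simp) a (by simp)
        cases hb : aget? vst a with
        | none => rw [hb] at hsome; simp at hsome
        | some b =>
        have hst' : ∀ x ∈ as :: rest, ∀ y ∈ x, (aget? vst y).isSome = true := by
          intro x hx y hy
          rcases List.mem_cons.mp hx with h | h
          · exact hst (a :: as) (by simp) y (by subst h; simp [hy])
          · exact hst x (by simp [h]) y hy
        cases b with
        | true =>
          have hv : agetD vst a false = true := by simp [agetD, hb]
          rw [goB_skip g cr a as rest c vst hv, ihF vst c hc hf hg hst']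
          rw [runA_cons, runA_cons, loopA_cons_visited g cr f a as vst hv]
        | false =>
          have hv : agetD vst a false = false := by simp [agetD, hb]
          have hpos := cntF_pos vst a hb
          have hlt := cntF_aset_true_lt vst a hb
          have hkey : (aget? vst a).isSome = true := by simp [hb]
          have hps : ∀ x, (aget? (aset vst a true) x).isSome = (aget? vst x).isSome :=
            isSome_aset vst a true hkey
          have hg1 : GOODv g (aset vst a true) := goodv_aset g vst a hkey hg
          have hadj : ∀ x ∈ agetD g a [], (aget? (aset vst a true) x).isSome = true :=
            fun x hx => by rw [hps x]; exact goodv_adj g vst hg a x hb hx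
          have hst1 : ∀ x ∈ agetD g a [] :: as :: rest, ∀ y ∈ x,
              (aget? (aset vst a true) y).isSome = true := by
            intro x hx y hy
            rcases List.mem_cons.mp hx with h | hx2
            · exact hadj y (h ▸ hy)
            · rw [hps y]
              exact hst' x hx2 y hy
          rw [goB_push g cr a as rest c vst false hv hb]
          rw [ihN (cntF (aset vst a true)) (by omega) (agetD g a [] :: as :: rest)
            (aset vst a true) (c + cr) (le_refl _) (by omega) hg1 hst1]
          obtain ⟨f0, rfl⟩ : ∃ f0, f = f0 + 1 := ⟨f - 1, by omega⟩
          have hfe : loopA g cr f0 (agetD g a []) (aset vst a true) =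
              loopA g cr (f0 + 1) (agetD g a []) (aset vst a true) :=
            loopA_fuel g cr (cntF (aset vst a true)) f0 (f0 + 1) _ _ (le_refl _)
              (by omega) (by omega) hg1 hadj
          simp only [runA_cons, loopA_cons_new_succ g cr f0 a as vst hv, hfe]
          congr 1
          ring

-- ===== VERDICT (by name: the statement is the Claim_ definition above) =====
theorem building_spec : Claim_equal_building := by
  intro nd g vst c_road _ hpre
  obtain ⟨_, _, hnd, hadj⟩ := hpre
  have hgood : GOODv g vst := fun p hp hm a ha =>
    isSome_aget?_of_mem_keys vst a (hadj p hp (Or.inr hm) a ha).1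
  have hcnt : cntF vst ≤ vst.length := List.length_filter_le _ _
  cases hga : aget? g nd with
  | none => exact absurd (isSome_aget?_of_mem_keys g nd hnd) (by simp [hga])
  | some ns =>
    have hm := aget?_mem g nd ns hga
    unfold Spec_building building building_alt
    rw [sim g c_road vst.length (cntF vst) [agetD g nd []] vst 0 (le_refl _) hcnt hgood
      (by
        intro fr hfr a ha
        simp at hfr
        subst hfr
        rw [agetD, hga] at ha
        simp at ha
        exact isSome_aget?_of_mem_keys vst a (hadj (nd, ns) hm (Or.inl rfl) a ha).1)]
    unfold runA
    unfold runA
    omega
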